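-- pv_equiv track=rewrite | github.com/ryanwhite04/python-urx | project/clean.py | getBestCircle
-- ===== SOURCE A (Python) =====
-- def getBestCircle(circles):
--     circles = [c for c in circles if any(c)]
--     for i, circle in enumerate(circles):
--         matching = 0
--         for j in range(1, len(circles)):
--             other = circles[(i+j)%len(circles)]
--             x = circle[0] - other[0]
--             y = circle[1] - other[1]
--             r = circle[2] + other[2]
--             if any(circle) and (x**2+y**2) < r**2/4:
--                 matching += 1
--             if matching > 1:
--                 return circle
--     return []
-- ===== SOURCE B (Python) =====
-- def getBestCircle(circles):
--     circles = [c for c in circles if any(c)]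
--     n = len(circles)
--     counts = [0] * n
--     for i in range(n):
--         ci = circles[i]
--         for j in range(i + 1, n):
--             cj = circles[j]
--             x = ci[0] - cj[0]
--             y = ci[1] - cj[1]
--             r = ci[2] + cj[2]
--             if x ** 2 + y ** 2 < r ** 2 / 4:
--                 counts[i] += 1
--                 counts[j] += 1
--     for c, k in zip(circles, counts):
--         if k > 1:
--             return c
--     return []
-- ===== Notes on version B (the rewrite author's own statement) =====
-- stated objective: alternative
-- what changed: B replaces A's per-circle rescan of all others with early exit and rotated modular indexing by a single pass over unordered pairs i<j that builds an overlap-count table, followed by a separate ordered scan returning the first circle whose count exceeds 1.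
-- outside the precondition, e.g. on getBestCircle([[1, 1, 1], [1, 1, 2], [1, 1, 3], [5]]): A returns [1, 1, 1], B raises IndexError
import Mathlib
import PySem

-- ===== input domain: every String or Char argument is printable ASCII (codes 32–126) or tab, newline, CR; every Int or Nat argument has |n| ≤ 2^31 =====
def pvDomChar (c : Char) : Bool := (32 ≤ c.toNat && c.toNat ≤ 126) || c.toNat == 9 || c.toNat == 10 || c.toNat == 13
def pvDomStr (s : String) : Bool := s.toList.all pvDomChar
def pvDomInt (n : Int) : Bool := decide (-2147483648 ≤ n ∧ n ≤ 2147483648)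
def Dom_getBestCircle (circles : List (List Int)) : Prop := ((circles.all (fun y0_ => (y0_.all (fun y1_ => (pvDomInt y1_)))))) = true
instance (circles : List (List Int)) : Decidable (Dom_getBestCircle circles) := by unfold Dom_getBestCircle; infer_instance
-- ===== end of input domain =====

-- B builds an overlap-count table over unordered pairs and then scans it, instead of
-- A's per-circle rescan of all others with early exit; same cost class, alternative structure.

-- ===== PORT A =====
-- truthiness of `any(c)` for a list of ints
def pvAny (c : List Int) : Bool := c.any (fun v => decide (v ≠ 0))

-- round a nonnegative integer to 53 significant bits, ties to even (IEEE double rounding)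
def pvRound53 (n : Nat) : Nat :=
  let L := PySem.Int.bitLength (n : Int)
  if L ≤ 53 then n
  else
    let k := L - 53
    let m := n / 2 ^ k
    let rem := n % 2 ^ k
    let half := 2 ^ (k - 1)
    (if half < rem ∨ (rem = half ∧ m % 2 = 1) then m + 1 else m) * 2 ^ k

-- exact model of Python's `s < rr/4` (true division producing a correctly rounded double)
-- for integer s and rr = r**2 ≥ 0; exact within Dom's |int| ≤ 2^31 bounds (no overflow).
def pvLtQuarter (s rr : Int) : Bool := decide (4 * s < (pvRound53 rr.toNat : Int))

-- A's inner `for j in range(1, len(circles))` with the mid-loop `return circle`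
def pvInnerA (F : List (List Int)) (i : Int) (circle : List Int) :
    List Int → Int → Option (List Int)
  | [], _ => none
  | j :: js, matching =>
      let other := PySem.List.pyGetD F (PySem.Int.mod (i + j) (F.length : Int)) []
      let x := PySem.List.pyGetD circle 0 0 - PySem.List.pyGetD other 0 0
      let y := PySem.List.pyGetD circle 1 0 - PySem.List.pyGetD other 1 0
      let r := PySem.List.pyGetD circle 2 0 + PySem.List.pyGetD other 2 0
      let matching' := if pvAny circle && pvLtQuarter (x ^ 2 + y ^ 2) (r ^ 2) then matching + 1 else matching
      if matching' > 1 then some circle else pvInnerA F i circle js matching'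

-- A's outer `for i, circle in enumerate(circles)`
def pvOuterA (F : List (List Int)) : List (Int × List Int) → List Int
  | [] => []
  | (i, circle) :: rest =>
      match pvInnerA F i circle (PySem.List.pyRange 1 (F.length : Int) 1) 0 with
      | some c => c
      | none => pvOuterA F rest

def getBestCircle (circles : List (List Int)) : List Int :=
  let F := circles.filter pvAny
  pvOuterA F (PySem.List.enumerate F 0)

-- ===== PORT B =====
-- the overlap test between two circles (Source B's inner condition)
def pvCondB (ci cj : List Int) : Bool :=
  let x := PySem.List.pyGetD ci 0 0 - PySem.List.pyGetD cj 0 0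
  let y := PySem.List.pyGetD ci 1 0 - PySem.List.pyGetD cj 1 0
  let r := PySem.List.pyGetD ci 2 0 + PySem.List.pyGetD cj 2 0
  pvLtQuarter (x ^ 2 + y ^ 2) (r ^ 2)

-- Source B's double loop over unordered pairs i<j building the counts table
def pvCounts (F : List (List Int)) : List Int :=
  (PySem.List.pyRange 0 (F.length : Int) 1).foldl
    (fun counts i =>
      (PySem.List.pyRange (i + 1) (F.length : Int) 1).foldl
        (fun counts j =>
          let ci := PySem.List.pyGetD F i []
          let cj := PySem.List.pyGetD F j []
          if pvCondB ci cj then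
            let c1 := PySem.List.pySetD counts i (PySem.List.pyGetD counts i 0 + 1)
            PySem.List.pySetD c1 j (PySem.List.pyGetD c1 j 0 + 1)
          else counts)
        counts)
    (List.replicate F.length 0)

-- Source B's final `for c, k in zip(circles, counts)`
def pvScanB : List (List Int × Int) → List Int
  | [] => []
  | (c, k) :: rest => if k > 1 then c else pvScanB rest

def getBestCircle_alt (circles : List (List Int)) : List Int :=
  let F := circles.filter pvAny
  pvScanB (F.zip (pvCounts F))

-- ===== PRECONDITION & SPEC =====
-- Pre_ excludes inputs where some circle passing the any() filter has fewer than 3 entries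
-- while at least two circles survive the filter: A raises IndexError on them (except when an
-- early return happens to precede the bad access, on which B raises instead of returning).
def Pre_getBestCircle (circles : List (List Int)) : Prop :=
  (circles.filter pvAny).length ≤ 1 ∨ ∀ c ∈ circles.filter pvAny, 3 ≤ c.length

instance (circles : List (List Int)) : Decidable (Pre_getBestCircle circles) := by
  unfold Pre_getBestCircle; infer_instance

def pvWitness_getBestCircle : List (List Int) := [[1, 1, 1], [10, 10, 1], [0, 0, 0]]

def Spec_getBestCircle (circles : List (List Int)) (out : List Int) : Prop := out = getBestCircle_alt circles
instance (circles : List (List Int)) (out : List Int) : Decidable (Spec_getBestCircle circles out) := by unfold Spec_getBestCircle; infer_instance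

-- ===== CLAIM (what is proved, stated in full; the proofs are below) =====
def Claim_equal_getBestCircle : Prop := ∀ (circles : List (List Int)), Dom_getBestCircle circles → Pre_getBestCircle circles → Spec_getBestCircle circles (getBestCircle circles)

-- ===== LEMMAS AND PROOFS =====

-- number of indices j ≠ i whose circle overlaps circle i (the shared characterisation)
def pvCnt (F : List (List Int)) (i : Nat) : Nat :=
  (List.range F.length).countP (fun j => decide (j ≠ i) && pvCondB (F.getD i []) (F.getD j []))

-- the common specification: first index (scanned in order) with count ≥ 2
def pvSpecScan (F : List (List Int)) : List Nat → List Int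
  | [] => []
  | t :: ts => if 2 ≤ pvCnt F t then F.getD t [] else pvSpecScan F ts

theorem pvCondB_comm (a b : List Int) : pvCondB a b = pvCondB b a := by
  simp only [pvCondB, pvLtQuarter]
  have h1 : (PySem.List.pyGetD a 0 0 - PySem.List.pyGetD b 0 0) ^ 2 + (PySem.List.pyGetD a 1 0 - PySem.List.pyGetD b 1 0) ^ 2
      = (PySem.List.pyGetD b 0 0 - PySem.List.pyGetD a 0 0) ^ 2 + (PySem.List.pyGetD b 1 0 - PySem.List.pyGetD a 1 0) ^ 2 := by ring
  have h2 : (PySem.List.pyGetD a 2 0 + PySem.List.pyGetD b 2 0) = (PySem.List.pyGetD b 2 0 + PySem.List.pyGetD a 2 0) := by ring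
  rw [h1, h2]

-- countP over a flatMap is the sum of the inner counts
theorem pvCountP_flatMap {α β : Type} (l : List α) (f : α → List β) (p : β → Bool) :
    (l.flatMap f).countP p = (l.map (fun a => (f a).countP p)).sum := by
  induction l with
  | nil => simp
  | cons a l ih => simp [List.countP_append, ih]

-- a 0/1 if-sum is a countP
theorem pvSum_ite_countP {α : Type} (l : List α) (p : α → Bool) :
    (l.map (fun x => if p x then 1 else 0)).sum = l.countP p := by
  induction l with
  | nil => simp
  | cons a l ih => by_cases h : p a <;> simp [h, ih, Nat.add_comm]

-- counting hits of a single key in a duplicate-free list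
theorem pvCountP_single (l : List Nat) (hl : l.Nodup) (k : Nat) (q : Nat → Bool) :
    l.countP (fun j => decide (j = k) && q j) = if k ∈ l ∧ q k then 1 else 0 := by
  induction l with
  | nil => simp
  | cons a l ih =>
      rw [List.countP_cons]
      rcases List.nodup_cons.mp hl with ⟨ha, hl'⟩
      by_cases hak : a = k
      · subst hak
        by_cases hq : q a <;> simp [ha, hq, ih hl']
      · have hm : k ∈ a :: l ↔ k ∈ l := by
          simp only [List.mem_cons, or_iff_right_iff_imp]
          intro h; exact absurd h.symm hak
        by_cases hk : k ∈ l ∧ q k <;> simp [hak, hk, ih hl', hm]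

-- Source B's pair step, over Nat indices
def pvStep (F : List (List Int)) (counts : List Int) (i j : Nat) : List Int :=
  if pvCondB (F.getD i []) (F.getD j []) then
    let c1 := counts.set i (counts.getD i 0 + 1)
    c1.set j (c1.getD j 0 + 1)
  else counts

def pvPairs (n : Nat) : List (Nat × Nat) :=
  (List.range n).flatMap (fun i => (List.range' (i + 1) (n - (i + 1))).map (fun j => (i, j)))

theorem pvCounts_eq_fold (F : List (List Int)) :
    pvCounts F = (pvPairs F.length).foldl (fun c p => pvStep F c p.1 p.2) (List.replicate F.length 0) := by
  unfold pvCounts pvPairs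
  rw [List.foldl_flatMap, PySem.List.pyRange_one]
  simp only [Int.sub_zero, Int.toNat_natCast, List.foldl_map]
  apply PySem.List.foldl_congr_mem
  intro counts k hk
  have hkn : k < F.length := List.mem_range.mp hk
  rw [PySem.List.pyRange_one, List.foldl_map, List.range'_eq_map_range, List.foldl_map]
  have hlen : ((F.length : Int) - (0 + (k : Int) + 1)).toNat = F.length - (k + 1) := by omega
  rw [hlen]
  apply PySem.List.foldl_congr_mem
  intro c t _
  have hcast : (0 : Int) + (k : Int) + 1 + (t : Int) = ((k + 1 + t : Nat) : Int) := by push_cast; ring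
  have hcast2 : (0 : Int) + (k : Int) = ((k : Nat) : Int) := by push_cast; ring
  have hcast3 : (k : Int) + 1 + (t : Int) = ((k + 1 + t : Nat) : Int) := by push_cast; ring
  simp only [pvStep, hcast, hcast2, hcast3, PySem.List.pyGetD_natCast, PySem.List.pySetD_natCast]

theorem pvStep_length (F : List (List Int)) (counts : List Int) (i j : Nat) :
    (pvStep F counts i j).length = counts.length := by
  unfold pvStep; split <;> simp

theorem pvStep_getD (F : List (List Int)) (counts : List Int) (i j k : Nat)
    (hi : i < counts.length) (hj : j < counts.length) (hij : i ≠ j) :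
    (pvStep F counts i j).getD k 0 =
      counts.getD k 0 + (if ((i = k) ∨ (j = k)) ∧ pvCondB (F.getD i []) (F.getD j []) then 1 else 0) := by
  unfold pvStep
  by_cases hc : pvCondB (F.getD i []) (F.getD j [])
  · simp only [hc, if_true, and_true]
    by_cases hik : i = k
    · subst hik
      simp [List.getD_eq_getElem?_getD, hi, hij, Ne.symm hij]
    · by_cases hjk : j = k
      · subst hjk
        simp [List.getD_eq_getElem?_getD, hj, hik]
      · simp [List.getD_eq_getElem?_getD, List.getElem?_set, hik, hjk]
  · simp only [List.getD_eq_getElem?_getD] at hc ⊢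
    simp [hc]

theorem pvFold_getD (F : List (List Int)) :
    ∀ (ps : List (Nat × Nat)) (counts : List Int),
      (∀ p ∈ ps, p.1 < counts.length ∧ p.2 < counts.length ∧ p.1 ≠ p.2) → ∀ (k : Nat),
      (ps.foldl (fun c p => pvStep F c p.1 p.2) counts).getD k 0 =
        counts.getD k 0 +
          (ps.countP (fun p => (decide (p.1 = k) || decide (p.2 = k)) && pvCondB (F.getD p.1 []) (F.getD p.2 [])) : Int) := by
  intro ps
  induction ps with
  | nil => intro counts _ k; simp
  | cons p ps ih =>
      intro counts hps k
      rcases hps p (List.mem_cons_self) with ⟨h1, h2, h3⟩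
      have hlen : (pvStep F counts p.1 p.2).length = counts.length := pvStep_length ..
      rw [List.foldl_cons, ih _ (fun q hq => by rw [hlen]; exact hps q (List.mem_cons_of_mem _ hq)) k,
        pvStep_getD F counts p.1 p.2 k h1 h2 h3, List.countP_cons]
      have hb : ((decide (p.1 = k) || decide (p.2 = k)) && pvCondB (F.getD p.1 []) (F.getD p.2 [])) = true
          ↔ ((p.1 = k ∨ p.2 = k) ∧ pvCondB (F.getD p.1 []) (F.getD p.2 []) = true) := by simp
      by_cases hp : (p.1 = k ∨ p.2 = k) ∧ pvCondB (F.getD p.1 []) (F.getD p.2 []) = true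
      · rw [if_pos hp, if_pos (hb.mpr hp)]; push_cast; ring
      · rw [if_neg hp, if_neg (fun h => hp (hb.mp h))]; push_cast; ring

theorem pvCountP_pairs (F : List (List Int)) (k : Nat) (hk : k < F.length) :
    (pvPairs F.length).countP
        (fun p => (decide (p.1 = k) || decide (p.2 = k)) && pvCondB (F.getD p.1 []) (F.getD p.2 [])) = pvCnt F k := by
  unfold pvPairs pvCnt
  set n := F.length with hn
  set q : Nat → Nat → Bool := fun i j => pvCondB (F.getD i []) (F.getD j []) with hq
  -- inner counts
  have hinner : ∀ i, ((List.range' (i + 1) (n - (i + 1))).map (fun j => (i, j))).countP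
      (fun p => (decide (p.1 = k) || decide (p.2 = k)) && q p.1 p.2)
      = if i = k then (List.range' (k + 1) (n - (k + 1))).countP (fun j => q k j)
        else if i < k ∧ q i k then 1 else 0 := by
    intro i
    rw [List.countP_map]
    by_cases hik : i = k
    · subst hik
      rw [if_pos rfl]
      apply List.countP_congr
      intro j hj
      simp [Function.comp]
    · rw [if_neg hik]
      have : ((fun p => (decide (p.1 = k) || decide (p.2 = k)) && q p.1 p.2) ∘ (fun j => (i, j)))
          = fun j => decide (j = k) && q i j := by
        funext j; simp [Function.comp, hik]
      rw [this, pvCountP_single _ (List.nodup_range') k (q i)]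
      have hmem : k ∈ List.range' (i + 1) (n - (i + 1)) ↔ i < k := by
        rw [List.mem_range'_1]; omega
      by_cases hik2 : i < k ∧ q i k
      · rw [if_pos ⟨hmem.mpr hik2.1, hik2.2⟩, if_pos hik2]
      · rw [if_neg (fun h => hik2 ⟨hmem.mp h.1, h.2⟩), if_neg hik2]
  rw [pvCountP_flatMap]
  have hmapc : (List.range n).map (fun i => ((List.range' (i + 1) (n - (i + 1))).map (fun j => (i, j))).countP
      (fun p => (decide (p.1 = k) || decide (p.2 = k)) && q p.1 p.2))
      = (List.range n).map (fun i => if i = k then (List.range' (k + 1) (n - (k + 1))).countP (fun j => q k j)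
        else if i < k ∧ q i k then 1 else 0) := by
    apply List.map_congr_left; intro i _; exact hinner i
  rw [hmapc]
  -- split the outer range at k
  have hsplit : List.range n = List.range k ++ (List.range (n - k)).map (fun t => k + t) := by
    have : n = k + (n - k) := by omega
    rw [this, List.range_add]; simp
  have hq_comm : ∀ i, q i k = q k i := fun i => pvCondB_comm _ _
  have hnk : n - k = (n - k - 1) + 1 := by omega
  rw [hsplit, List.map_append, List.sum_append, List.countP_append]
  -- first segment: indices below k
  have hpart1 : ((List.range k).map (fun i => if i = k then (List.range' (k + 1) (n - (k + 1))).countP (fun j => q k j)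
        else if i < k ∧ q i k then 1 else 0)).sum = (List.range k).countP (fun j => q k j) := by
    have : (List.range k).map (fun i => if i = k then (List.range' (k + 1) (n - (k + 1))).countP (fun j => q k j)
          else if i < k ∧ q i k then 1 else 0) = (List.range k).map (fun i => if q k i then 1 else 0) := by
      apply List.map_congr_left
      intro i hi
      have hik : i < k := List.mem_range.mp hi
      rw [if_neg (by omega)]
      by_cases hq2 : q i k
      · rw [if_pos ⟨hik, hq2⟩, if_pos (by rw [← hq_comm]; exact hq2)]
      · rw [if_neg (fun h => hq2 h.2), if_neg (by rw [← hq_comm]; exact hq2)]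
    rw [this, pvSum_ite_countP]
  have hpart1' : (List.range k).countP (fun j => decide (j ≠ k) && q k j) = (List.range k).countP (fun j => q k j) := by
    apply List.countP_congr
    intro j hj
    have : j < k := List.mem_range.mp hj
    simp [show j ≠ k by omega]
  -- second segment: index k and above
  have hpart2 : (((List.range (n - k)).map (fun t => k + t)).map (fun i => if i = k then (List.range' (k + 1) (n - (k + 1))).countP (fun j => q k j)
        else if i < k ∧ q i k then 1 else 0)).sum = (List.range' (k + 1) (n - (k + 1))).countP (fun j => q k j) := by
    rw [List.map_map, hnk, List.range_succ_eq_map, List.map_cons, List.map_map, List.sum_cons]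
    have hzero : ((List.range (n - k - 1)).map (((fun i => if i = k then (List.range' (k + 1) (n - (k + 1))).countP (fun j => q k j)
          else if i < k ∧ q i k then 1 else 0) ∘ (fun t => k + t)) ∘ Nat.succ)).sum = 0 := by
      rw [List.sum_eq_zero]
      intro x hx
      rcases List.mem_map.mp hx with ⟨t, _, rfl⟩
      simp only [Function.comp]
      rw [if_neg (by omega), if_neg (by omega)]
    rw [hzero]
    simp [Function.comp]
  have hpart2' : (((List.range (n - k)).map (fun t => k + t)).countP (fun j => decide (j ≠ k) && q k j))
      = (List.range' (k + 1) (n - (k + 1))).countP (fun j => q k j) := by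
    rw [hnk, List.range_succ_eq_map, List.map_cons, List.countP_cons, List.map_map, List.countP_map,
      List.range'_eq_map_range, List.countP_map]
    have e1 : (if (fun j => decide (j ≠ k) && q k j) (k + 0) = true then 1 else 0) = 0 := by simp
    rw [e1, Nat.add_zero]
    apply List.countP_congr
    intro t _
    simp only [Function.comp]
    have h2 : k + 1 + t = k + t.succ := by omega
    rw [h2]
    simp
  rw [hpart1, hpart1', hpart2, hpart2']

theorem pvPairs_mem (n : Nat) : ∀ p ∈ pvPairs n, p.1 < n ∧ p.2 < n ∧ p.1 ≠ p.2 := by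
  intro p hp
  unfold pvPairs at hp
  rcases List.mem_flatMap.mp hp with ⟨i, hi, hmem⟩
  rcases List.mem_map.mp hmem with ⟨j, hj, rfl⟩
  have h1 := List.mem_range.mp hi
  have h2 := List.mem_range'_1.mp hj
  refine ⟨by omega, by omega, by omega⟩

theorem pvFold_length (F : List (List Int)) (ps : List (Nat × Nat)) :
    ∀ counts : List Int, (ps.foldl (fun c p => pvStep F c p.1 p.2) counts).length = counts.length := by
  induction ps with
  | nil => intro counts; rfl
  | cons p ps ih => intro counts; rw [List.foldl_cons, ih, pvStep_length]

theorem pvCounts_length (F : List (List Int)) : (pvCounts F).length = F.length := by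
  rw [pvCounts_eq_fold, pvFold_length, List.length_replicate]

theorem pvCounts_getD (F : List (List Int)) (k : Nat) (hk : k < F.length) :
    (pvCounts F).getD k 0 = (pvCnt F k : Int) := by
  rw [pvCounts_eq_fold,
    pvFold_getD F (pvPairs F.length) (List.replicate F.length 0)
      (by intro p hp; rw [List.length_replicate]; exact pvPairs_mem F.length p hp) k,
    pvCountP_pairs F k hk]
  simp

theorem pvInnerA_eq (F : List (List Int)) (i : Int) (circle : List Int) :
    ∀ (js : List Int) (m : Int), 0 ≤ m → m ≤ 1 →
      pvInnerA F i circle js m =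
        (if 2 ≤ m + ((js.countP (fun j => pvAny circle && pvCondB circle
            (PySem.List.pyGetD F (PySem.Int.mod (i + j) (F.length : Int)) []))) : Int)
         then some circle else none) := by
  intro js
  induction js with
  | nil =>
      intro m h0 h1
      rw [pvInnerA, List.countP_nil]
      rw [if_neg (by push_cast; omega)]
  | cons j js ih =>
      intro m h0 h1
      rw [pvInnerA, List.countP_cons]
      simp only [pvCondB]
      by_cases hb : (pvAny circle && pvLtQuarter
            ((PySem.List.pyGetD circle 0 0 - PySem.List.pyGetD (PySem.List.pyGetD F (PySem.Int.mod (i + j) (F.length : Int)) []) 0 0) ^ 2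
              + (PySem.List.pyGetD circle 1 0 - PySem.List.pyGetD (PySem.List.pyGetD F (PySem.Int.mod (i + j) (F.length : Int)) []) 1 0) ^ 2)
            ((PySem.List.pyGetD circle 2 0 + PySem.List.pyGetD (PySem.List.pyGetD F (PySem.Int.mod (i + j) (F.length : Int)) []) 2 0) ^ 2)) = true
      · simp only [hb, if_true]
        by_cases hm : m + 1 > 1
        · rw [if_pos hm, if_pos (by push_cast; omega)]
        · rw [if_neg hm, ih (m + 1) (by omega) (by omega)]
          simp only [pvCondB]
          by_cases hcnt : (2:Int) ≤ m + 1 + ((js.countP (fun j => pvAny circle && pvLtQuarter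
            ((PySem.List.pyGetD circle 0 0 - PySem.List.pyGetD (PySem.List.pyGetD F (PySem.Int.mod (i + j) (F.length : Int)) []) 0 0) ^ 2
              + (PySem.List.pyGetD circle 1 0 - PySem.List.pyGetD (PySem.List.pyGetD F (PySem.Int.mod (i + j) (F.length : Int)) []) 1 0) ^ 2)
            ((PySem.List.pyGetD circle 2 0 + PySem.List.pyGetD (PySem.List.pyGetD F (PySem.Int.mod (i + j) (F.length : Int)) []) 2 0) ^ 2))) : Int)
          · rw [if_pos hcnt, if_pos (by push_cast at hcnt ⊢; omega)]
          · rw [if_neg hcnt, if_neg (by push_cast at hcnt ⊢; omega)]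
      · simp only [hb, if_false, Bool.false_eq_true]
        rw [if_neg (by omega), ih m h0 h1]
        simp [pvCondB]


theorem pvRotCount (n t : Nat) (ht : t < n) (qN : Nat → Bool) :
    (PySem.List.pyRange 1 (n : Int) 1).countP
        (fun j => qN (PySem.Int.mod ((t : Int) + j) (n : Int)).toNat)
      = (List.range n).countP (fun u => decide (u ≠ t) && qN u) := by
  have hn0 : (0 : Int) < (n : Int) := by omega
  rw [PySem.List.pyRange_one, List.countP_map]
  have hlen : ((n : Int) - 1).toNat = n - 1 := by omega
  rw [hlen]
  -- LHS: split the j-range at the wrap point n-1-t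
  have hsplitL : List.range (n - 1) = List.range (n - 1 - t) ++ (List.range t).map (fun k => (n - 1 - t) + k) := by
    have h2 : List.range ((n - 1 - t) + t) = List.range (n - 1 - t) ++ (List.range t).map (fun k => (n - 1 - t) + k) := List.range_add
    rw [show (n - 1 - t) + t = n - 1 from by omega] at h2
    exact h2
  rw [hsplitL, List.countP_append, List.countP_map]
  have hpart1 : (List.range (n - 1 - t)).countP
      ((fun j => qN (PySem.Int.mod ((t : Int) + j) (n : Int)).toNat) ∘ (fun k : Nat => 1 + (k : Int)))
      = (List.range (n - 1 - t)).countP (fun k => qN (t + 1 + k)) := by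
    apply List.countP_congr
    intro k hk
    have hklt : k < n - 1 - t := List.mem_range.mp hk
    simp only [Function.comp]
    rw [PySem.Int.mod_eq_emod_of_pos hn0, Int.emod_eq_of_lt (by omega) (by omega),
      show ((t : Int) + (1 + (k : Int))).toNat = t + 1 + k from by omega]
  have hpart2 : (List.range t).countP
      (((fun j => qN (PySem.Int.mod ((t : Int) + j) (n : Int)).toNat) ∘ (fun k : Nat => 1 + (k : Int))) ∘ (fun k => (n - 1 - t) + k))
      = (List.range t).countP qN := by
    apply List.countP_congr
    intro k hk
    have hklt : k < t := List.mem_range.mp hk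
    simp only [Function.comp]
    have he : (t : Int) + (1 + ((n - 1 - t) + k : Nat)) = (k : Int) + (n : Int) := by push_cast; omega
    rw [PySem.Int.mod_eq_emod_of_pos hn0, he, ← Int.emod_eq_add_self_emod,
      Int.emod_eq_of_lt (by omega) (by omega), Int.toNat_natCast]
  rw [hpart1, hpart2]
  -- RHS: split the index range at t
  have hsplitR : List.range n = List.range t ++ (List.range (n - t)).map (fun k => t + k) := by
    have h2 : List.range (t + (n - t)) = List.range t ++ (List.range (n - t)).map (fun k => t + k) := List.range_add
    rw [show t + (n - t) = n from by omega] at h2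
    exact h2
  rw [hsplitR, List.countP_append, List.countP_map]
  have hR1 : (List.range t).countP (fun u => decide (u ≠ t) && qN u) = (List.range t).countP qN := by
    apply List.countP_congr
    intro u hu
    have : u < t := List.mem_range.mp hu
    simp [show u ≠ t from by omega]
  have hnt : n - t = (n - t - 1) + 1 := by omega
  have hR2 : (List.range (n - t)).countP ((fun u => decide (u ≠ t) && qN u) ∘ (fun k => t + k))
      = (List.range (n - 1 - t)).countP (fun k => qN (t + 1 + k)) := by
    rw [hnt, List.range_succ_eq_map, List.countP_cons, List.countP_map]
    have e0 : (if ((fun u => decide (u ≠ t) && qN u) ∘ fun k => t + k) 0 = true then 1 else 0) = 0 := by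
      simp [Function.comp]
    rw [e0, Nat.add_zero, show n - t - 1 = n - 1 - t from by omega]
    apply List.countP_congr
    intro k _
    simp only [Function.comp]
    have h1 : t + k.succ = t + 1 + k := by omega
    simp [h1, show t + 1 + k ≠ t from by omega]
  rw [hR1, hR2, Nat.add_comm]


theorem pvOuterA_aux (F : List (List Int)) (hF : ∀ c ∈ F, pvAny c = true) :
    ∀ (m t : Nat), F.length - t = m →
      pvOuterA F (PySem.List.enumerate (F.drop t) (t : Int)) = pvSpecScan F (List.range' t (F.length - t)) := by
  intro m
  induction m with
  | zero =>
      intro t ht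
      rw [ht, List.drop_eq_nil_of_le (by omega)]
      rfl
  | succ m ih =>
      intro t ht
      have htlt : t < F.length := by omega
      rw [List.drop_eq_getElem_cons htlt, PySem.List.enumerate_cons, ht, List.range'_succ]
      have hmem : F[t] ∈ F := List.getElem_mem htlt
      have hany : pvAny F[t] = true := hF _ hmem
      rw [pvOuterA, pvInnerA_eq F (t : Int) F[t] _ 0 le_rfl (by omega)]
      -- identify the inner count with pvCnt F t
      have hgetDt : F.getD t [] = F[t] := by
        rw [List.getD_eq_getElem?_getD, List.getElem?_eq_getElem htlt]; rfl
      have hcount : ((PySem.List.pyRange 1 (F.length : Int) 1).countP (fun j => pvAny F[t] && pvCondB F[t]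
            (PySem.List.pyGetD F (PySem.Int.mod ((t : Int) + j) (F.length : Int)) []))) = pvCnt F t := by
        have hcong : ∀ j ∈ PySem.List.pyRange 1 (F.length : Int) 1,
            ((pvAny F[t] && pvCondB F[t] (PySem.List.pyGetD F (PySem.Int.mod ((t : Int) + j) (F.length : Int)) [])) = true)
              ↔ ((fun u => pvCondB (F.getD t []) (F.getD u [])) (PySem.Int.mod ((t : Int) + j) (F.length : Int)).toNat = true) := by
          intro j _
          have hn0 : (0 : Int) < (F.length : Int) := by omega
          have hnn : 0 ≤ PySem.Int.mod ((t : Int) + j) (F.length : Int) := PySem.Int.mod_nonneg _ hn0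
          have hlt : PySem.Int.mod ((t : Int) + j) (F.length : Int) < (F.length : Int) := PySem.Int.mod_lt _ hn0
          rw [hany, Bool.true_and, PySem.List.pyGetD_eq_getElem F [] hnn (by simpa using hlt)]
          have hg2 : F.getD (PySem.Int.mod ((t : Int) + j) (F.length : Int)).toNat [] =
              F[(PySem.Int.mod ((t : Int) + j) (F.length : Int)).toNat] := by
            rw [List.getD_eq_getElem?_getD, List.getElem?_eq_getElem (by omega)]; rfl
          show _ ↔ (pvCondB (F.getD t []) (F.getD (PySem.Int.mod ((t : Int) + j) (F.length : Int)).toNat []) = true)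
          rw [hg2, hgetDt]
        rw [List.countP_congr hcong, pvRotCount F.length t htlt (fun u => pvCondB (F.getD t []) (F.getD u []))]
        rfl
      rw [hcount]
      by_cases hc : 2 ≤ pvCnt F t
      · rw [if_pos (by push_cast; omega)]
        rw [pvSpecScan, if_pos hc, hgetDt]
      · rw [if_neg (by push_cast; omega)]
        rw [pvSpecScan, if_neg hc]
        have hcast : (t : Int) + 1 = ((t + 1 : Nat) : Int) := by push_cast; ring
        rw [hcast, ih (t + 1) (by omega), show F.length - (t + 1) = m from by omega]

theorem portA_eq_spec (F : List (List Int)) (hF : ∀ c ∈ F, pvAny c = true) :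
    pvOuterA F (PySem.List.enumerate F 0) = pvSpecScan F (List.range' 0 F.length) := by
  have := pvOuterA_aux F hF (F.length - 0) 0 rfl
  simpa using this

theorem pvScan_aux (F : List (List Int)) (counts : List Int) (hlen : counts.length = F.length)
    (hval : ∀ t, t < F.length → counts.getD t 0 = (pvCnt F t : Int)) :
    ∀ (m t : Nat), F.length - t = m →
      pvScanB ((F.drop t).zip (counts.drop t)) = pvSpecScan F (List.range' t (F.length - t)) := by
  intro m
  induction m with
  | zero =>
      intro t ht
      rw [ht, List.drop_eq_nil_of_le (by omega), List.zip_nil_left]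
      rfl
  | succ m ih =>
      intro t ht
      have htlt : t < F.length := by omega
      have htc : t < counts.length := by omega
      rw [List.drop_eq_getElem_cons htlt, List.drop_eq_getElem_cons htc, List.zip_cons_cons, ht,
        List.range'_succ]
      show (if counts[t] > 1 then F[t] else pvScanB ((F.drop (t+1)).zip (counts.drop (t+1))))
        = pvSpecScan F (t :: List.range' (t+1) m)
      have hcv : counts[t] = (pvCnt F t : Int) := by
        rw [← hval t htlt, List.getD_eq_getElem?_getD, List.getElem?_eq_getElem htc]
        rfl
      have hrec := ih (t+1) (by omega)
      rw [show F.length - (t+1) = m from by omega] at hrec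
      by_cases hc : 2 ≤ pvCnt F t
      · rw [if_pos (by rw [hcv]; exact_mod_cast by omega), pvSpecScan, if_pos hc,
          List.getD_eq_getElem?_getD, List.getElem?_eq_getElem htlt]
        rfl
      · rw [if_neg (by rw [hcv]; push_cast; omega), pvSpecScan, if_neg hc, hrec]

theorem portB_eq_spec (F : List (List Int)) :
    pvScanB (F.zip (pvCounts F)) = pvSpecScan F (List.range' 0 F.length) := by
  have := pvScan_aux F (pvCounts F) (pvCounts_length F) (fun t ht => pvCounts_getD F t ht)
    (F.length - 0) 0 rfl
  simpa using this

-- ===== VERDICT (by name: the statement is the Claim_ definition above) =====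
theorem getBestCircle_spec : Claim_equal_getBestCircle := by
  intro circles _ _
  unfold Spec_getBestCircle getBestCircle getBestCircle_alt
  rw [portA_eq_spec _ (fun c hc => (List.mem_filter.mp hc).2), portB_eq_spec]
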